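-- pv_equiv track=rewrite | github.com/huynhtrankhanh/ACGFinalExamResearch | scripts/build_single_pdf.py | text_to_pages
-- ===== SOURCE A (Python) =====
-- def wrap_line(line: str, width: int) -> list[str]:
--     if line == "":
--         return [""]
--     line = line.replace("\t", "    ")
--     chunks: list[str] = []
--     current = line
--     while len(current) > width:
--         # prefer wrapping on whitespace near boundary
--         split = current.rfind(" ", 0, width + 1)
--         if split <= 0:
--             split = width
--         chunks.append(current[:split])
--         current = current[split:].lstrip()
--     chunks.append(current)
--     return chunks
--
-- def text_to_pages(text: str, max_chars: int = 95, lines_per_page: int = 64) -> list[list[str]]: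
--     all_lines: list[str] = []
--     for raw in text.splitlines():
--         all_lines.extend(wrap_line(raw, max_chars))
--
--     pages: list[list[str]] = []
--     i = 0
--     while i < len(all_lines):
--         pages.append(all_lines[i : i + lines_per_page])
--         i += lines_per_page
--     if not pages:
--         pages = [["(empty)"]]
--     return pages
-- ===== SOURCE B (Python) =====
-- def _wrap(line, width):
--     # single forward pass over the line with a start pointer and a
--     # remembered break candidate, instead of repeated rfind + re-slicing
--     if line == "":
--         return [""]
--     line = line.replace("\t", "    ")
--     n = len(line)
--     out = []
--     start = 0
--     while n - start > width:
--         last = -1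
--         j = start + 1
--         while j <= start + width:
--             if line[j] == " ":
--                 last = j
--             j += 1
--         brk = start + width if last == -1 else last
--         out.append(line[start:brk])
--         start = brk
--         while start < n and line[start].isspace():
--             start += 1
--     out.append(line[start:])
--     return out
--
-- def text_to_pages(text, max_chars=95, lines_per_page=64):
--     all_lines = [chunk for raw in text.splitlines() for chunk in _wrap(raw, max_chars)]
--     pages = [all_lines[i : i + lines_per_page] for i in range(0, len(all_lines), lines_per_page)]
--     return pages if pages else [["(empty)"]]
-- ===== Notes on version B (the rewrite author's own statement) =====
-- stated objective: alternative
-- what changed: wrap_line's repeated rfind+re-slice loop is replaced by a single forward scan over the line with a start pointer and a remembered last-space break candidate, the extend loop by a flat comprehension, and the pagination while-loop by a range-step comprehension.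
-- outside the precondition, e.g. on text_to_pages('', 0, 0): A returns [['(empty)']], B raises ValueError; on text_to_pages('\n', -1, 1): A returns [['']], B returns [['']]
import Mathlib
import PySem

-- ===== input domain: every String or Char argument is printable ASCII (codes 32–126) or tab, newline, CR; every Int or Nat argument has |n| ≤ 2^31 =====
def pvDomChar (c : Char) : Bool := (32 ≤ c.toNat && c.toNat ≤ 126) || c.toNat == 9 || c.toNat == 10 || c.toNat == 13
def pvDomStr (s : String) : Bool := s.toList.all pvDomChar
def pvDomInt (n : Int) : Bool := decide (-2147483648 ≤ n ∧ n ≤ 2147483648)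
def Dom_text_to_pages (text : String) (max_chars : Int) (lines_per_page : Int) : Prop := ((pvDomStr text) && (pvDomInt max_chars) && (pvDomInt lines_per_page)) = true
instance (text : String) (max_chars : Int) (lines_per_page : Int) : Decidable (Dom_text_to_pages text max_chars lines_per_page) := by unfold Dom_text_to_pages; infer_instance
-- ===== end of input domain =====

-- B rewrites wrap_line as a single forward scan with a start pointer (alternative
-- structure, not measured faster) and paginates by a range comprehension.

-- ===== PORT A =====
-- while len(current) > width: split=current.rfind(" ",0,width+1); if split<=0: split=width; …
-- fuel = current.length suffices when width ≥ 1 (each iteration drops ≥ 1 char); guard only.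
def wrapLineGo (width : Int) : Nat → List Char → List (List Char)
  | 0, current => [current]
  | fuel + 1, current =>
    if width < (current.length : Int) then
      let split := PySem.Chars.rfindFrom current [' '] 0 (some (width + 1))
      let split := if split ≤ 0 then width else split
      PySem.List.slice current none (some split) ::
        wrapLineGo width fuel (PySem.Chars.lstrip (PySem.List.slice current (some split) none))
    else [current]

def wrap_line (line : List Char) (width : Int) : List (List Char) :=
  if line = [] then [[]]
  else
    let line := PySem.Chars.replace line ['\t'] [' ', ' ', ' ', ' ']
    wrapLineGo width line.length line

-- while i < len(all_lines): pages.append(all_lines[i:i+lpp]); i += lpp  — the moving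
-- index i is rendered as recursion on the remaining suffix; fuel guard as above.
def pagesGo (lpp : Int) : Nat → List String → List (List String)
  | 0, _ => []
  | fuel + 1, xs =>
    if xs = [] then []
    else PySem.List.slice xs none (some lpp) :: pagesGo lpp fuel (PySem.List.slice xs (some lpp) none)

def text_to_pages (text : String) (max_chars : Int) (lines_per_page : Int) : List (List String) :=
  let all_lines := (PySem.Str.splitlines text).foldl
    (fun acc raw => acc ++ (wrap_line raw.toList max_chars).map String.ofList) []
  let pages := pagesGo lines_per_page all_lines.length all_lines
  if pages = [] then [["(empty)"]] else pages

-- ===== PORT B =====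
-- for j in start+1 .. start+width: if line[j] == " ": last = j  — forward scan keeping
-- the latest space position (here relative to the chunk start).
def scanLastSpace : List Char → Int → Int → Int
  | [], _, last => last
  | c :: cs, j, last => scanLastSpace cs (j + 1) (if c = ' ' then j else last)

-- B's start pointer into the fixed line is rendered as the remaining suffix `rest`
-- (start ↦ rest = line[start:]); fuel guard as in A's port.
def wrapScan (width : Int) : Nat → List Char → List (List Char)
  | 0, rest => [rest]
  | fuel + 1, rest =>
    if width < (rest.length : Int) then
      let last := scanLastSpace (List.take width.toNat (List.drop 1 rest)) 1 (-1)
      let brk := if last = -1 then width else last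
      List.take brk.toNat rest ::
        wrapScan width fuel (List.dropWhile PySem.Chars.isspace (List.drop brk.toNat rest))
    else [rest]

def wrapB (line : List Char) (width : Int) : List (List Char) :=
  if line = [] then [[]]
  else
    let line := PySem.Chars.replace line ['\t'] [' ', ' ', ' ', ' ']
    wrapScan width line.length line

def text_to_pages_alt (text : String) (max_chars : Int) (lines_per_page : Int) : List (List String) :=
  let all_lines := (PySem.Str.splitlines text).flatMap
    (fun raw => (wrapB raw.toList max_chars).map String.ofList)
  let pages := (PySem.List.pyRange 0 all_lines.length lines_per_page).map
    (fun i => PySem.List.slice all_lines (some i) (some (i + lines_per_page)))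
  if pages = [] then [["(empty)"]] else pages

-- ===== PRECONDITION & SPEC =====
-- Pre_ excludes non-positive max_chars or lines_per_page: there A's while loops make no
-- progress and loop forever on any non-empty line (resp. non-empty all_lines); A returns
-- only on degenerate texts whose affected loop body is never entered.
def Pre_text_to_pages (text : String) (max_chars : Int) (lines_per_page : Int) : Prop :=
  1 ≤ max_chars ∧ 1 ≤ lines_per_page
instance (text : String) (max_chars : Int) (lines_per_page : Int) : Decidable (Pre_text_to_pages text max_chars lines_per_page) := by unfold Pre_text_to_pages; infer_instance

def pvWitness_text_to_pages : String × Int × Int := ("hello world", 5, 2)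

def Spec_text_to_pages (text : String) (max_chars : Int) (lines_per_page : Int) (out : List (List String)) : Prop := out = text_to_pages_alt text max_chars lines_per_page
instance (text : String) (max_chars : Int) (lines_per_page : Int) (out : List (List String)) : Decidable (Spec_text_to_pages text max_chars lines_per_page out) := by unfold Spec_text_to_pages; infer_instance

-- ===== CLAIM (what is proved, stated in full; the proofs are below) =====
def Claim_equal_text_to_pages : Prop := ∀ (text : String) (max_chars : Int) (lines_per_page : Int), Dom_text_to_pages text max_chars lines_per_page → Pre_text_to_pages text max_chars lines_per_page → Spec_text_to_pages text max_chars lines_per_page (text_to_pages text max_chars lines_per_page)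

-- ===== LEMMAS AND PROOFS =====

-- last index of a space, the common specification of A's rfind and B's forward scan
def lsp : List Char → Option Nat
  | [] => none
  | c :: cs =>
    match lsp cs with
    | some k => some (k + 1)
    | none => if c = ' ' then some 0 else none

theorem lsp_append (xs : List Char) (c : Char) :
    lsp (xs ++ [c]) = if c = ' ' then some xs.length else lsp xs := by
  induction xs with
  | nil => simp [lsp]
  | cons x xs ih =>
    simp only [List.cons_append, lsp, ih]
    by_cases hc : c = ' ' <;> simp [hc] <;> cases hx : lsp xs <;> simp [hx]

theorem scanLastSpace_eq (cs : List Char) (j last : Int) :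
    scanLastSpace cs j last = (match lsp cs with | some k => j + k | none => last) := by
  induction cs generalizing j last with
  | nil => simp [scanLastSpace, lsp]
  | cons c cs ih =>
    simp only [scanLastSpace, lsp, ih]
    cases hx : lsp cs with
    | some k => push_cast; ring_nf
    | none => by_cases hc : c = ' ' <;> simp [hc]

theorem rfind_go_eq (s : List Char) (m : Nat) :
    PySem.Chars.rfind.go s [' '] m
      = (match lsp (s.take (m + 1)) with | some k => (k : Int) | none => -1) := by
  induction m with
  | zero =>
    cases s with
    | nil => simp [PySem.Chars.rfind.go, lsp, List.isPrefixOf]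
    | cons c t =>
      by_cases hc : c = ' '
      · simp [PySem.Chars.rfind.go, lsp, List.isPrefixOf, hc]
      · simp [PySem.Chars.rfind.go, lsp, List.isPrefixOf, hc, Ne.symm hc]
  | succ j ih =>
    show (if [' '].isPrefixOf (s.drop (j + 1)) then ((j : Int) + 1) else PySem.Chars.rfind.go s [' '] j) = _
    cases h : s[j + 1]? with
    | none =>
      have hlen : s.length ≤ j + 1 := List.getElem?_eq_none_iff.mp h
      have hdrop : s.drop (j + 1) = [] := List.drop_eq_nil_iff.mpr hlen
      have htake : s.take (j + 1 + 1) = s.take (j + 1) := by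
        simp [List.take_succ, h]
      rw [hdrop, htake]
      simpa [List.isPrefixOf] using ih
    | some c =>
      have hlt : j + 1 < s.length := (List.getElem?_eq_some_iff.mp h).1
      have hdrop : s.drop (j + 1) = c :: s.drop (j + 2) := by
        rw [List.drop_eq_getElem_cons hlt]
        simp [(List.getElem?_eq_some_iff.mp h).2]
      have htake : s.take (j + 1 + 1) = s.take (j + 1) ++ [c] := by
        simp [List.take_succ, h]
      rw [hdrop, htake, lsp_append]
      by_cases hc : c = ' '
      · have hmin : (s.take (j + 1)).length = j + 1 := by
          simp [List.length_take]; omega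
        simp [List.isPrefixOf, hc, hmin]
      · simpa [List.isPrefixOf, hc, Ne.symm hc] using ih

theorem rfind_eq (s : List Char) :
    PySem.Chars.rfind s [' '] = (match lsp s with | some k => (k : Int) | none => -1) := by
  rw [PySem.Chars.rfind, rfind_go_eq]
  have : s.take (s.length + 1) = s := List.take_of_length_le (by omega)
  rw [this]

theorem rfindFrom_window (c : Char) (cs : List Char) (width : Int) (hw : 1 ≤ width)
    (hlen : width < ((c :: cs).length : Int)) :
    PySem.Chars.rfindFrom (c :: cs) [' '] 0 (some (width + 1))
      = PySem.Chars.rfind (c :: List.take width.toNat cs) [' '] := by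
  have hnat : (width + 1).toNat = width.toNat + 1 := by omega
  have h1 : ¬(((c :: cs).length : Int) < width + 1) := by omega
  have h2 : ¬(width + 1 < (0 : Int)) := by omega
  have h3 : ¬((0 : Int) < 0) := by omega
  simp only [PySem.Chars.rfindFrom, h1, if_false, h2, h3, Int.toNat_zero, List.drop_zero,
    hnat, List.take_succ_cons]
  by_cases hr : PySem.Chars.rfind (c :: List.take width.toNat cs) [' '] = -1
  · rw [if_pos hr, hr]
  · rw [if_neg hr, zero_add]

theorem step_glue (width b : Int) (hb : 0 ≤ b) (fuel : Nat)
    (ih : ∀ cur, wrapLineGo width fuel cur = wrapScan width fuel cur) (current : List Char) :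
    PySem.List.slice current none (some b) ::
        wrapLineGo width fuel (PySem.Chars.lstrip (PySem.List.slice current (some b) none)) =
    List.take b.toNat current ::
        wrapScan width fuel (List.dropWhile PySem.Chars.isspace (List.drop b.toNat current)) := by
  rw [PySem.List.slice_to current hb, PySem.List.slice_from current hb]
  simp only [PySem.Chars.lstrip, ih]

theorem wrapScan_eq (fuel : Nat) (width : Int) (hw : 1 ≤ width) :
    ∀ current, wrapLineGo width fuel current = wrapScan width fuel current := by
  induction fuel with
  | zero => intro current; rfl
  | succ fuel ih =>
    intro current
    by_cases hlen : width < (current.length : Int)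
    · cases current with
      | nil => simp at hlen; omega
      | cons c cs =>
        simp only [wrapLineGo, wrapScan, if_pos hlen]
        rw [rfindFrom_window c cs width hw hlen, rfind_eq]
        have hdrop1 : List.drop 1 (c :: cs) = cs := rfl
        rw [hdrop1, scanLastSpace_eq]
        rcases hx : lsp (List.take width.toNat cs) with _ | k
        · simp only [lsp, hx]
          by_cases hc : c = ' '
          · simp only [if_pos hc]
            norm_num
            exact List.cons_eq_cons.mp (step_glue width width (by omega) fuel ih _)
          · simp only [if_neg hc]
            norm_num
            exact List.cons_eq_cons.mp (step_glue width width (by omega) fuel ih _)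
        · simp only [lsp, hx]
          rw [if_neg (by omega : ¬(((k + 1 : Nat) : Int) ≤ 0)),
            if_neg (by omega : ¬(1 + (k : Int) = -1)),
            (by push_cast; ring : (1 + (k : Int)) = ((k + 1 : Nat) : Int))]
          exact step_glue width ((k + 1 : Nat) : Int) (by omega) fuel ih _
    · simp only [wrapLineGo, wrapScan, if_neg hlen]

theorem wrap_eq (line : List Char) (width : Int) (hw : 1 ≤ width) :
    wrap_line line width = wrapB line width := by
  by_cases h : line = [] <;> simp [wrap_line, wrapB, h, wrapScan_eq _ _ hw]

theorem pyRange_pos_peel (n s : Int) (hs : 0 < s) (hn : 0 < n) :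
    PySem.List.pyRange 0 n s = 0 :: (PySem.List.pyRange 0 (n - s) s).map (· + s) := by
  rw [PySem.List.pyRange_of_pos _ _ hs, PySem.List.pyRange_of_pos _ _ hs]
  have hq0 : 0 ≤ (n - 1) / s := Int.ediv_nonneg (by omega) (by omega)
  have hcnt : ((n - 0 + s - 1) / s).toNat = ((n - 1) / s).toNat + 1 := by
    have h1 : n - 0 + s - 1 = (n - 1) + 1 * s := by ring
    rw [h1, Int.add_mul_ediv_right _ _ (by omega : s ≠ 0)]
    omega
  have hcnt2 : (if (0 : Int) < n - s then ((n - s - 0 + s - 1) / s).toNat else 0)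
      = ((n - 1) / s).toNat := by
    by_cases h : (0 : Int) < n - s
    · rw [if_pos h]
      congr 1
      ring_nf
    · rw [if_neg h]
      have : (n - 1) / s = 0 := Int.ediv_eq_zero_of_lt (by omega) (by omega)
      omega
  rw [if_pos (by omega : (0 : Int) < n), hcnt, hcnt2, List.range_succ_eq_map]
  simp only [List.map_cons, List.map_map]
  refine List.cons_eq_cons.mpr ⟨by norm_num, ?_⟩
  refine List.map_congr_left fun k _ => ?_
  simp only [Function.comp]
  push_cast
  ring

theorem mem_pyRange_pos_nonneg {x m s : Int} (hs : 0 < s)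
    (hx : x ∈ PySem.List.pyRange 0 m s) : 0 ≤ x := by
  rw [PySem.List.pyRange_of_pos _ _ hs] at hx
  simp only [List.mem_map, List.mem_range] at hx
  obtain ⟨k, -, rfl⟩ := hx
  positivity

theorem pages_eq (fuel : Nat) (lpp : Int) (hl : 1 ≤ lpp) :
    ∀ xs : List String, xs.length ≤ fuel →
      pagesGo lpp fuel xs
        = (PySem.List.pyRange 0 xs.length lpp).map
            (fun i => PySem.List.slice xs (some i) (some (i + lpp))) := by
  induction fuel with
  | zero =>
    intro xs hf
    have hx : xs = [] := List.eq_nil_of_length_eq_zero (by omega)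
    subst hx
    simp [pagesGo, PySem.List.pyRange_of_pos _ _ (by omega : (0 : Int) < lpp)]
  | succ fuel ih =>
    intro xs hf
    by_cases hx : xs = []
    · subst hx
      simp [pagesGo, PySem.List.pyRange_of_pos _ _ (by omega : (0 : Int) < lpp)]
    · have hlen1 : 1 ≤ xs.length := List.length_pos_of_ne_nil hx
      simp only [pagesGo, if_neg hx]
      rw [PySem.List.slice_to xs (by omega), PySem.List.slice_from xs (by omega)]
      rw [ih (xs.drop lpp.toNat) (by simp; omega)]
      rw [pyRange_pos_peel (xs.length : Int) lpp (by omega) (by exact_mod_cast hlen1)]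
      simp only [List.map_cons, List.map_map]
      refine List.cons_eq_cons.mpr ⟨?_, ?_⟩
      · simp [PySem.List.slice_to xs (show (0 : Int) ≤ lpp by omega)]
      by_cases hc : lpp ≤ (xs.length : Int)
      · have hdl : ((xs.drop lpp.toNat).length : Int) = (xs.length : Int) - lpp := by
          simp; omega
        rw [hdl]
        refine List.map_congr_left fun i hi => ?_
        have hi0 : 0 ≤ i := mem_pyRange_pos_nonneg (by omega) hi
        simp only [Function.comp]
        rw [PySem.List.slice_toNat _ (by omega) (by omega),
          PySem.List.slice_toNat _ (by omega) (by omega), List.drop_drop]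
        have e1 : lpp.toNat + i.toNat = (i + lpp).toNat := by omega
        have e2 : (i + lpp).toNat - i.toNat = (i + lpp + lpp).toNat - (i + lpp).toNat := by omega
        rw [e1, e2]
      · have hdl : xs.drop lpp.toNat = [] := List.drop_eq_nil_iff.mpr (by omega)
        rw [hdl]
        simp [PySem.List.pyRange_of_pos _ _ (show (0 : Int) < lpp by omega)]
        exact fun h => absurd h (by omega)

-- ===== VERDICT (by name: the statement is the Claim_ definition above) =====
theorem text_to_pages_spec : Claim_equal_text_to_pages := by
  intro text max_chars lines_per_page _hdom hpre
  unfold Spec_text_to_pages text_to_pages text_to_pages_alt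
  obtain ⟨hmc, hlpp⟩ := hpre
  have hwfun : (fun raw : String => (wrap_line raw.toList max_chars).map String.ofList)
      = (fun raw : String => (wrapB raw.toList max_chars).map String.ofList) :=
    funext fun raw => by rw [wrap_eq _ _ hmc]
  rw [PySem.List.foldl_append_eq_flatMap]
  simp only [List.nil_append, hwfun]
  rw [pages_eq _ _ hlpp _ le_rfl]
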